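-- pv_equiv track=rewrite | github.com/INU-Fake-Developers/ps-ghee | problem_solving/hw1_201801634_.py | add_decimal
-- ===== SOURCE A (Python) =====
-- from typing import List
--
-- def add_decimal(digits_left: List[int], digits_right: List[int]) -> List[int]:
--     """
--     >>> add_decimal([3, 6], [4, 2])
--     (0, [7, 8])
--     >>> add_decimal([9, 3, 7], [0, 9, 9])
--     (1, [0, 3, 6])
--     >>> add_decimal([9, 9, 9, 5], [0, 0, 0, 3])
--     (0, [9, 9, 9, 8])
--     """
--     if len(digits_left) != len(digits_right):
--         raise Exception("Operands should have same length.")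
--
--     number_of_digits = len(digits_left)
--
--     result = []
--     carry = 0
--
--     for i in range(number_of_digits - 1, -1, -1):
--         addition = digits_left[i] + digits_right[i] + carry
--
--         summation = addition % 10
--         carry = addition // 10
--
--         result.insert(0, summation)
--
--     return carry, result
-- ===== SOURCE B (Python) =====
-- def add_decimal(digits_left, digits_right):
--     if len(digits_left) != len(digits_right):
--         raise Exception("Operands should have same length.")
--
--     L = len(digits_left)
--
--     left_val = 0
--     for d in digits_left:
--         left_val = left_val * 10 + d
--     right_val = 0
--     for d in digits_right:
--         right_val = right_val * 10 + d
--
--     total = left_val + right_val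
--
--     result = []
--     for _ in range(L):
--         result.append(total % 10)
--         total //= 10
--     result.reverse()
--
--     return total, result
-- ===== Notes on version B (the rewrite author's own statement) =====
-- stated objective: alternative
-- what changed: Replaces the right-to-left per-digit carry loop by collapsing each list into one integer with positional weights, adding the two integers, and re-expanding the sum into L digits and a carry with divmod arithmetic (slower than A on very long lists due to bignum cost).
import Mathlib
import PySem

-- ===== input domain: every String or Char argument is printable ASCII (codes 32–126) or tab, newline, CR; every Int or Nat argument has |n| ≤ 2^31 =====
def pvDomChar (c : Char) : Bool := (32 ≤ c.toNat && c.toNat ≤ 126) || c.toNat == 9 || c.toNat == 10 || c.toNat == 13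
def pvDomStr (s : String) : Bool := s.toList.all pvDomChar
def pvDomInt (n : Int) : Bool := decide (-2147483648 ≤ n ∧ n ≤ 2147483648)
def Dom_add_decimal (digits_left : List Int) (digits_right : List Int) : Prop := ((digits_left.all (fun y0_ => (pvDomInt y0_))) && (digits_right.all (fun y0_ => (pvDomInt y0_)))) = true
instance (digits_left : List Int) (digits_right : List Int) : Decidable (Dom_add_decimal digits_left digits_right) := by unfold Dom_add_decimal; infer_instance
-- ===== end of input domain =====

-- B collapses each list into one integer, adds, and re-expands with divmod; same return value as A's carry loop.

-- ===== PORT A =====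
-- for i in range(L-1, -1, -1): add digits with carry, result.insert(0, summation)
def add_decimal (digits_left : List Int) (digits_right : List Int) : Int × List Int :=
  let numberOfDigits : Int := digits_left.length
  (PySem.List.pyRange (numberOfDigits - 1) (-1) (-1)).foldl
    (fun (st : Int × List Int) i =>
      let addition := PySem.List.pyGetD digits_left i 0 + PySem.List.pyGetD digits_right i 0 + st.1
      (PySem.Int.floordiv addition 10, PySem.Int.mod addition 10 :: st.2))
    (0, [])

-- ===== PORT B =====
def add_decimal_alt (digits_left : List Int) (digits_right : List Int) : Int × List Int :=
  let leftVal := digits_left.foldl (fun acc d => acc * 10 + d) 0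
  let rightVal := digits_right.foldl (fun acc d => acc * 10 + d) 0
  let st := (List.range digits_left.length).foldl
    (fun (st : Int × List Int) _ => (PySem.Int.floordiv st.1 10, st.2 ++ [PySem.Int.mod st.1 10]))
    (leftVal + rightVal, [])
  (st.1, st.2.reverse)

-- ===== PRECONDITION & SPEC =====
-- A raises Exception("Operands should have same length.") when the lengths differ (B raises the same way).
def Pre_add_decimal (digits_left : List Int) (digits_right : List Int) : Prop :=
  digits_left.length = digits_right.length
instance (digits_left : List Int) (digits_right : List Int) : Decidable (Pre_add_decimal digits_left digits_right) := by unfold Pre_add_decimal; infer_instance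
def pvWitness_add_decimal : List Int × List Int := ([9, 3, 7], [0, 9, 9])

def Spec_add_decimal (digits_left : List Int) (digits_right : List Int) (out : Int × List Int) : Prop := out = add_decimal_alt digits_left digits_right
instance (digits_left : List Int) (digits_right : List Int) (out : Int × List Int) : Decidable (Spec_add_decimal digits_left digits_right out) := by unfold Spec_add_decimal; infer_instance

-- ===== CLAIM (what is proved, stated in full; the proofs are below) =====
def Claim_equal_add_decimal : Prop := ∀ (digits_left : List Int) (digits_right : List Int), Dom_add_decimal digits_left digits_right → Pre_add_decimal digits_left digits_right → Spec_add_decimal digits_left digits_right (add_decimal digits_left digits_right)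

-- ===== LEMMAS AND PROOFS =====

-- the low n base-10 digits of S, most significant first (floor semantics)
def pvDig (S : Int) : Nat → List Int
  | 0 => []
  | n + 1 => PySem.Int.mod (PySem.Int.floordiv S (10 ^ n)) 10 :: pvDig S n

-- value of the length-k prefixes of l and r, digit j weighted 10^(k-1-j)
def pvPval (l r : List Int) : Nat → Int
  | 0 => 0
  | k + 1 => PySem.List.pyGetD l (k : Int) 0 + PySem.List.pyGetD r (k : Int) 0 + 10 * pvPval l r k

theorem pv_fd_fd (S : Int) (k : Nat) :
    PySem.Int.floordiv (PySem.Int.floordiv S 10) (10 ^ k) = PySem.Int.floordiv S (10 ^ (k + 1)) := by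
  rw [PySem.Int.floordiv_eq_ediv_of_pos (b := (10:Int)) (by norm_num),
      PySem.Int.floordiv_eq_ediv_of_pos (by positivity),
      PySem.Int.floordiv_eq_ediv_of_pos (by positivity),
      Int.ediv_ediv_of_nonneg (by norm_num), pow_succ, mul_comm]

theorem pv_fd_fd' (S : Int) (k : Nat) :
    PySem.Int.floordiv (PySem.Int.floordiv S (10 ^ k)) 10 = PySem.Int.floordiv S (10 ^ (k + 1)) := by
  rw [PySem.Int.floordiv_eq_ediv_of_pos (b := (10:Int)) (by norm_num),
      PySem.Int.floordiv_eq_ediv_of_pos (by positivity),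
      PySem.Int.floordiv_eq_ediv_of_pos (by positivity),
      Int.ediv_ediv_of_nonneg (by positivity), pow_succ]

theorem pv_fd_shift (a t : Int) : PySem.Int.floordiv (a + 10 * t) 10 = PySem.Int.floordiv a 10 + t := by
  rw [PySem.Int.floordiv_eq_ediv_of_pos (by norm_num), PySem.Int.floordiv_eq_ediv_of_pos (by norm_num),
      mul_comm, Int.add_mul_ediv_right _ _ (by norm_num)]

theorem pv_md_shift (a t : Int) : PySem.Int.mod (a + 10 * t) 10 = PySem.Int.mod a 10 := by
  rw [PySem.Int.mod_eq_emod_of_pos (by norm_num), PySem.Int.mod_eq_emod_of_pos (by norm_num)]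
  omega

theorem pvDig_succ (S : Int) (n : Nat) :
    pvDig S (n + 1) = pvDig (PySem.Int.floordiv S 10) n ++ [PySem.Int.mod S 10] := by
  induction n with
  | zero => simp [pvDig]
  | succ n ih =>
    show PySem.Int.mod (PySem.Int.floordiv S (10 ^ (n+1))) 10 :: pvDig S (n + 1) = _
    rw [ih, pvDig, pv_fd_fd]
    simp

-- A's loop invariant: folding indices k-1 … 0 with carry c prepends the digits of c + pvPval
theorem pv_A_inv (l r : List Int) (k : Nat) (c : Int) (ds : List Int) :
    (PySem.List.pyRange ((k : Int) - 1) (-1) (-1)).foldl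
      (fun (st : Int × List Int) i =>
        let addition := PySem.List.pyGetD l i 0 + PySem.List.pyGetD r i 0 + st.1
        (PySem.Int.floordiv addition 10, PySem.Int.mod addition 10 :: st.2))
      (c, ds)
    = (PySem.Int.floordiv (c + pvPval l r k) (10 ^ k),
       pvDig (c + pvPval l r k) k ++ ds) := by
  induction k generalizing c ds with
  | zero =>
    rw [PySem.List.pyRange_neg_one_eq_nil (by norm_num)]
    simp [pvPval, pvDig]
  | succ k ih =>
    rw [show ((k + 1 : Nat) : Int) - 1 = (k : Int) by push_cast; ring,
        PySem.List.pyRange_neg_one_cons (show (-1 : Int) < (k : Int) by omega)]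
    simp only [List.foldl_cons]
    rw [ih]
    set a := PySem.List.pyGetD l (k : Int) 0 + PySem.List.pyGetD r (k : Int) 0 + c with ha
    have hS : c + pvPval l r (k + 1) = a + 10 * pvPval l r k := by
      simp only [pvPval, ha]; ring
    rw [hS, ← pv_fd_shift a (pvPval l r k), pv_fd_fd, pvDig_succ, pv_md_shift]
    simp

-- B's loop invariant: the range-L fold divides out L digits, appended least significant first
theorem pv_B_inv (n : Nat) (t : Int) (res : List Int) :
    (List.range n).foldl
      (fun (st : Int × List Int) _ => (PySem.Int.floordiv st.1 10, st.2 ++ [PySem.Int.mod st.1 10]))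
      (t, res)
    = (PySem.Int.floordiv t (10 ^ n), res ++ (pvDig t n).reverse) := by
  induction n generalizing res with
  | zero => simp [pvDig]
  | succ n ih =>
    rw [List.range_succ, List.foldl_append, ih]
    simp only [List.foldl_cons, List.foldl_nil]
    rw [pv_fd_fd']
    simp [pvDig]

def pvPvalOne (xs : List Int) : Nat → Int
  | 0 => 0
  | k + 1 => PySem.List.pyGetD xs (k : Int) 0 + 10 * pvPvalOne xs k

theorem pvPval_eq_add (l r : List Int) (k : Nat) :
    pvPval l r k = pvPvalOne l k + pvPvalOne r k := by
  induction k with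
  | zero => simp [pvPval, pvPvalOne]
  | succ k ih => simp only [pvPval, pvPvalOne, ih]; ring

theorem pvPvalOne_eq_foldl_take (xs : List Int) (k : Nat) (hk : k ≤ xs.length) :
    pvPvalOne xs k = (xs.take k).foldl (fun acc d => acc * 10 + d) 0 := by
  induction k with
  | zero => simp [pvPvalOne]
  | succ k ih =>
    have hk' : k < xs.length := hk
    rw [List.take_add_one, List.getElem?_eq_getElem hk']
    simp only [pvPvalOne, ih (Nat.le_of_lt hk'), Option.toList_some, List.foldl_append,
      List.foldl_cons, List.foldl_nil, PySem.List.pyGetD_natCast, List.getD_eq_getElem _ _ hk']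
    ring

theorem pvPvalOne_eq_foldl (xs : List Int) :
    pvPvalOne xs xs.length = xs.foldl (fun acc d => acc * 10 + d) 0 := by
  simpa using pvPvalOne_eq_foldl_take xs xs.length le_rfl

-- ===== VERDICT (by name: the statement is the Claim_ definition above) =====
theorem add_decimal_spec : Claim_equal_add_decimal := by
  intro l r _ hpre
  have hpre' : l.length = r.length := hpre
  have hval : (0 : Int) + pvPval l r l.length
      = l.foldl (fun acc d => acc * 10 + d) 0 + r.foldl (fun acc d => acc * 10 + d) 0 := by
    rw [zero_add, pvPval_eq_add, pvPvalOne_eq_foldl l, hpre', pvPvalOne_eq_foldl r]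
  show add_decimal l r = add_decimal_alt l r
  unfold add_decimal add_decimal_alt
  simp only [pv_A_inv, pv_B_inv, hval]
  simp
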